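-- pv_equiv track=rewrite | github.com/montalvomiguelo/algosnake | aoc_24_07.py | backtrack
-- ===== SOURCE A (Python) =====
-- def backtrack(curr, i, target, nums):
--     if i == len(nums):
--         return curr == target
--
--     for j in range(i, len(nums)):
--         if backtrack(curr + nums[j], j + 1, target, nums):
--             return True
--
--         if backtrack(curr * nums[j], j + 1, target, nums):
--             return True
--
--     return False
-- ===== SOURCE B (Python) =====
-- def backtrack(curr, i, target, nums):
--     if i == len(nums):
--         return curr == target
--     reach = {curr}
--     last = set()
--     for j in range(i, len(nums)):
--         x = nums[j]
--         last = {c + x for c in reach} | {c * x for c in reach}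
--         reach = reach | last
--     return target in last
-- ===== Notes on version B (the rewrite author's own statement) =====
-- stated objective: alternative
-- what changed: Replaced the branching try-and-recurse backtracking with a single forward pass maintaining the set of distinct reachable values (a set-valued DP), answering by membership in the final layer.
import Mathlib
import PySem

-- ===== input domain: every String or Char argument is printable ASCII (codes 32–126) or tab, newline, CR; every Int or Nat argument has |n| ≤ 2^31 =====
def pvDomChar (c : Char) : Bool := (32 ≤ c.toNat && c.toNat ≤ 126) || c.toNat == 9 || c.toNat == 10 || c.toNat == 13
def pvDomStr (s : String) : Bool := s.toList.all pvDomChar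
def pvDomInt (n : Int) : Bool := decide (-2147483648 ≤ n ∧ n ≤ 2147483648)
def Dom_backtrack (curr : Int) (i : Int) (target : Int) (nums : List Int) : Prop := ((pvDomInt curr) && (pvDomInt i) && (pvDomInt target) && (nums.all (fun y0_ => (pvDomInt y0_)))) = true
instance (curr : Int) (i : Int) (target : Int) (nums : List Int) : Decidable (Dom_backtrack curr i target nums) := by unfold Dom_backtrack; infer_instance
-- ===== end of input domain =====

-- B replaces A's branching try-and-recurse backtracking by one forward pass maintaining
-- the set of distinct reachable values (a set-valued DP); a different algorithm, similar cost.

-- ===== PORT A =====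
-- 'for j in range(i, len(nums))' with early 'return True' becomes backtrackLoop on the
-- running loop variable j (started at i by backtrack).
-- tiny measure facts for the mutual recursion (cited by name in decreasing_by)
lemma btDec1 (n j : Int) (h : j < n) :
    2 * (n - (j + 1)).toNat + 2 < 2 * (n - j).toNat + 1 := by omega
lemma btDec2 (n j : Int) (h : j < n) :
    2 * (n - (j + 1)).toNat + 1 < 2 * (n - j).toNat + 1 := by omega

mutual
def backtrack (curr : Int) (i : Int) (target : Int) (nums : List Int) : Bool :=
  if i = (nums.length : Int) then curr == target
  else backtrackLoop curr target nums i
termination_by 2 * (((nums.length : Int) - i).toNat) + 2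
decreasing_by exact Nat.lt_succ_self _

def backtrackLoop (curr : Int) (target : Int) (nums : List Int) (j : Int) : Bool :=
  if _h : j < (nums.length : Int) then
    match PySem.List.pyGet? nums j with
    | none => false   -- IndexError in Python; excluded by Pre_backtrack
    | some x =>
      if backtrack (curr + x) (j + 1) target nums then true
      else if backtrack (curr * x) (j + 1) target nums then true
      else backtrackLoop curr target nums (j + 1)
  else false
termination_by 2 * (((nums.length : Int) - j).toNat) + 1
decreasing_by
  · exact btDec1 (nums.length : Int) j _h
  · exact btDec1 (nums.length : Int) j _h
  · exact btDec2 (nums.length : Int) j _h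
end

-- ===== PORT B =====
-- one iteration of B's loop body: (reach, last) ↦ (reach | last', last')
def altStep (nums : List Int) (p : PySem.Set Int × PySem.Set Int) (j : Int) :
    PySem.Set Int × PySem.Set Int :=
  match PySem.List.pyGet? nums j with
  | none => p   -- IndexError in Python; excluded by Pre_backtrack
  | some x =>
    let last := PySem.Set.ofList (p.1.map (· + x) ++ p.1.map (· * x))
    (PySem.Set.union p.1 last, last)

def backtrack_alt (curr : Int) (i : Int) (target : Int) (nums : List Int) : Bool :=
  if i = (nums.length : Int) then curr == target
  else
    let st := (PySem.List.pyRange i nums.length 1).foldl (altStep nums)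
      (PySem.Set.ofList [curr], PySem.Set.empty)
    PySem.Set.contains st.2 target

-- ===== PRECONDITION & SPEC =====
-- Pre_ excludes exactly i < -len(nums), where Python A (and B) raise IndexError on nums[i].
def Pre_backtrack (curr : Int) (i : Int) (target : Int) (nums : List Int) : Prop :=
  -(nums.length : Int) ≤ i
instance (curr : Int) (i : Int) (target : Int) (nums : List Int) : Decidable (Pre_backtrack curr i target nums) := by unfold Pre_backtrack; infer_instance
def pvWitness_backtrack : Int × Int × Int × List Int := (1, 0, 3, [2])

def Spec_backtrack (curr : Int) (i : Int) (target : Int) (nums : List Int) (out : Bool) : Prop := out = backtrack_alt curr i target nums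
instance (curr : Int) (i : Int) (target : Int) (nums : List Int) (out : Bool) : Decidable (Spec_backtrack curr i target nums out) := by unfold Spec_backtrack; infer_instance

-- ===== CLAIM (what is proved, stated in full; the proofs are below) =====
def Claim_equal_backtrack : Prop := ∀ (curr : Int) (i : Int) (target : Int) (nums : List Int), Dom_backtrack curr i target nums → Pre_backtrack curr i target nums → Spec_backtrack curr i target nums (backtrack curr i target nums)

-- ===== LEMMAS AND PROOFS =====

-- A's loop at j = n-1: only the last element is tried
lemma loop_last (c t : Int) (nums : List Int) (p x : Int)
    (hp : p + 1 = (nums.length : Int)) (hx : PySem.List.pyGet? nums p = some x) :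
    backtrackLoop c t nums p = ((c + x == t) || (c * x == t)) := by
  rw [backtrackLoop]
  have h1 : p < (nums.length : Int) := by omega
  rw [dif_pos h1, hx]
  dsimp only
  have hb : ∀ d : Int, backtrack d (p + 1) t nums = (d == t) := by
    intro d; rw [backtrack, if_pos hp]
  have hl : backtrackLoop c t nums (p + 1) = false := by
    rw [backtrackLoop, dif_neg (by omega)]
  rw [hb, hb, hl]
  cases (c + x == t) <;> cases (c * x == t) <;> simp

-- A's loop unrolled one step (p+1 still inside the list)
lemma loop_unroll (c t : Int) (nums : List Int) (p x : Int)
    (hp : p + 1 < (nums.length : Int)) (hx : PySem.List.pyGet? nums p = some x) :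
    backtrackLoop c t nums p =
      (backtrackLoop (c + x) t nums (p + 1) || backtrackLoop (c * x) t nums (p + 1) ||
        backtrackLoop c t nums (p + 1)) := by
  rw [backtrackLoop]
  rw [dif_pos (by omega : p < (nums.length : Int)), hx]
  dsimp only
  have hb : ∀ d : Int, backtrack d (p + 1) t nums = backtrackLoop d t nums (p + 1) := by
    intro d; rw [backtrack, if_neg (by omega)]
  rw [hb, hb]
  cases backtrackLoop (c + x) t nums (p + 1) <;>
    cases backtrackLoop (c * x) t nums (p + 1) <;> simp

lemma pyGet?_some_of_inrange (nums : List Int) (p : Int)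
    (h1 : -(nums.length : Int) ≤ p) (h2 : p < (nums.length : Int)) :
    ∃ x, PySem.List.pyGet? nums p = some x := by
  cases hx : PySem.List.pyGet? nums p with
  | some x => exact ⟨x, rfl⟩
  | none =>
    rw [PySem.List.pyGet?_eq_none_iff] at hx
    exact absurd (by unfold PySem.Raise.InRange; omega) hx

lemma mem_opsSet (S : PySem.Set Int) (x t : Int) :
    t ∈ PySem.Set.ofList (S.map (· + x) ++ S.map (· * x)) ↔
      ∃ c ∈ S, c + x = t ∨ c * x = t := by
  rw [PySem.Set.mem_ofList]
  simp only [List.mem_append, List.mem_map]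
  constructor
  · rintro (⟨c, hc, rfl⟩ | ⟨c, hc, rfl⟩)
    · exact ⟨c, hc, Or.inl rfl⟩
    · exact ⟨c, hc, Or.inr rfl⟩
  · rintro ⟨c, hc, rfl | rfl⟩
    · exact Or.inl ⟨c, hc, rfl⟩
    · exact Or.inr ⟨c, hc, rfl⟩

-- main invariant: B's fold from position p answers "some value in reach starts a successful A-loop at p"
lemma fold_invariant (t : Int) (nums : List Int) :
    ∀ (k : Nat) (p : Int), p + k = (nums.length : Int) → 0 < k → -(nums.length : Int) ≤ p →
    ∀ (S l0 : PySem.Set Int),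
      (PySem.Set.contains
          ((PySem.List.pyRange p nums.length 1).foldl (altStep nums) (S, l0)).2 t = true)
        ↔ ∃ c ∈ S, backtrackLoop c t nums p = true := by
  intro k
  induction k with
  | zero => intro p hp hk; omega
  | succ m ih =>
    intro p hp hk hlow S l0
    have hpn : p < (nums.length : Int) := by omega
    obtain ⟨x, hx⟩ := pyGet?_some_of_inrange nums p hlow hpn
    rw [PySem.List.pyRange_one_cons hpn, List.foldl_cons]
    have hstep : altStep nums (S, l0) p =
        (PySem.Set.union S (PySem.Set.ofList (S.map (· + x) ++ S.map (· * x))),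
         PySem.Set.ofList (S.map (· + x) ++ S.map (· * x))) := by
      unfold altStep; rw [hx]
    rw [hstep]
    set L := PySem.Set.ofList (S.map (· + x) ++ S.map (· * x)) with hL
    by_cases hm : m = 0
    · -- p = n - 1 : last iteration
      subst hm
      have hrest : PySem.List.pyRange (p + 1) nums.length 1 = [] := by
        rw [PySem.List.pyRange_one]
        have : ((nums.length : Int) - (p + 1)).toNat = 0 := by omega
        rw [this]; rfl
      rw [hrest]
      simp only [List.foldl_nil]
      rw [PySem.Set.contains_iff, hL, mem_opsSet]
      constructor
      · rintro ⟨c, hc, hor⟩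
        refine ⟨c, hc, ?_⟩
        rw [loop_last c t nums p x (by omega) hx]
        rcases hor with h | h <;> simp [h]
      · rintro ⟨c, hc, hloop⟩
        rw [loop_last c t nums p x (by omega) hx] at hloop
        refine ⟨c, hc, ?_⟩
        rcases Bool.or_eq_true_iff.mp hloop with h | h
        · exact Or.inl (by simpa using h)
        · exact Or.inr (by simpa using h)
    · -- p + 1 < n : use the induction hypothesis
      have hp1 : p + 1 + (m : Int) = (nums.length : Int) := by omega
      rw [ih (p + 1) hp1 (by omega) (by omega) (PySem.Set.union S L) L]
      have hmem : ∀ c : Int, c ∈ PySem.Set.union S L ↔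
          c ∈ S ∨ ∃ a ∈ S, a + x = c ∨ a * x = c := by
        intro c; rw [PySem.Set.mem_union, hL, mem_opsSet]
      have hun : ∀ c : Int, backtrackLoop c t nums p =
          (backtrackLoop (c + x) t nums (p + 1) || backtrackLoop (c * x) t nums (p + 1) ||
            backtrackLoop c t nums (p + 1)) := fun c =>
        loop_unroll c t nums p x (by omega) hx
      constructor
      · rintro ⟨c, hc, hloop⟩
        rcases (hmem c).mp hc with hcS | ⟨a, haS, rfl | rfl⟩
        · exact ⟨c, hcS, by rw [hun c]; simp [hloop]⟩
        · exact ⟨a, haS, by rw [hun a]; simp [hloop]⟩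
        · exact ⟨a, haS, by rw [hun a]; simp [hloop]⟩
      · rintro ⟨c, hc, hloop⟩
        rw [hun c] at hloop
        rcases Bool.or_eq_true_iff.mp hloop with h | h
        · rcases Bool.or_eq_true_iff.mp h with h' | h'
          · exact ⟨c + x, (hmem _).mpr (Or.inr ⟨c, hc, Or.inl rfl⟩), h'⟩
          · exact ⟨c * x, (hmem _).mpr (Or.inr ⟨c, hc, Or.inr rfl⟩), h'⟩
        · exact ⟨c, (hmem c).mpr (Or.inl hc), h⟩

-- ===== VERDICT (by name: the statement is the Claim_ definition above) =====
theorem backtrack_spec : Claim_equal_backtrack := by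
  intro curr i target nums _hdom hpre
  unfold Spec_backtrack
  unfold Pre_backtrack at hpre
  by_cases hi : i = (nums.length : Int)
  · rw [backtrack, backtrack_alt, if_pos hi, if_pos hi]
  · rw [backtrack, backtrack_alt, if_neg hi, if_neg hi]
    by_cases hlt : i < (nums.length : Int)
    · have := fold_invariant target nums ((nums.length : Int) - i).toNat i
        (by omega) (by omega) hpre (PySem.Set.ofList [curr]) PySem.Set.empty
      rw [Bool.eq_iff_iff, this]
      constructor
      · intro h
        exact ⟨curr, by simp [PySem.Set.mem_ofList], h⟩
      · rintro ⟨c, hc, h⟩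
        have : c = curr := by simpa [PySem.Set.mem_ofList] using hc
        rwa [this] at h
    · -- i > len(nums): A's loop body never runs; B's range is empty and last stays ∅
      have hrange : PySem.List.pyRange i nums.length 1 = [] := by
        rw [PySem.List.pyRange_one]
        have : ((nums.length : Int) - i).toNat = 0 := by omega
        rw [this]; rfl
      rw [hrange]
      rw [backtrackLoop, dif_neg (by omega)]
      rfl
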